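-- pv_equiv track=rewrite | github.com/svend4/meta | projects/hexdim/hexdim.py | q6_as_8x8_grid
-- ===== SOURCE A (Python) =====
-- def _popcount(x):
--     c = 0
--     while x:
--         c += x & 1
--         x >>= 1
--     return c
--
-- def trigram_decomposition(h):
--     """
--     Разложить гексаграмму h на (нижнюю, верхнюю) триграммы.
--
--     Нижняя триграмма (земля): биты 0,1,2 → {0..7}
--     Верхняя триграмма (небо): биты 3,4,5 → {0..7}
--
--     Q6 = Q3_lower × Q3_upper — классическая структура И-Цзин.
--     """
--     lower = h & 7          # биты 0-2
--     upper = (h >> 3) & 7   # биты 3-5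
--     return lower, upper
--
-- def q6_to_grid_coords(h, method='trigram'):
--     """
--     Отобразить вершину h в 2D-координаты для визуализации.
--
--     Методы:
--       'trigram' : (lower_trigram, upper_trigram) — 8×8 сетка
--       'yang'    : (yang_count, value_within_level) — треугольная форма
--       'gray'    : (gray_row, gray_col) — упорядочение по коду Грея
--     """
--     if method == 'trigram':
--         lower, upper = trigram_decomposition(h)
--         return lower, upper  # 0..7 × 0..7
--
--     elif method == 'yang':
--         w = _popcount(h)
--         # Внутри уровня yang_count=w: порядковый номер среди вершин того же веса
--         same_weight = sorted(v for v in range(64) if _popcount(v) == w)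
--         pos = same_weight.index(h)
--         return w, pos
--
--     elif method == 'gray':
--         # Код Грея: i → i ⊕ (i >> 1)
--         gray_order = [i ^ (i >> 1) for i in range(64)]
--         pos = gray_order.index(h)
--         return pos // 8, pos % 8
--
--     else:
--         raise ValueError(f"Unknown method: {method}")
--
-- def q6_as_8x8_grid(ordering='trigram'):
--     """
--     Разместить все 64 гексаграммы в сетке 8×8.
--
--     ordering='trigram': строка=lower, столбец=upper (X = (Z₂)³ × (Z₂)³)
--     ordering='gray'   : строка=row, столбец=col в коде Грея
--     ordering='natural': строка=h//8, столбец=h%8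
--     """
--     grid = [[None] * 8 for _ in range(8)]
--     for h in range(64):
--         if ordering == 'trigram':
--             lower, upper = trigram_decomposition(h)
--             grid[upper][lower] = h
--         elif ordering == 'gray':
--             row, col = q6_to_grid_coords(h, 'gray')
--             grid[row][col] = h
--         else:
--             grid[h // 8][h % 8] = h
--     return grid
-- ===== SOURCE B (Python) =====
-- def q6_as_8x8_grid(ordering='trigram'):
--     # Build the grid position-first: cell (r,c) holds the hexagram placed there.
--     if ordering == 'gray':
--         return [[(8 * r + c) ^ ((8 * r + c) >> 1) for c in range(8)] for r in range(8)]
--     return [[8 * r + c for c in range(8)] for r in range(8)]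
-- ===== Notes on version B (the rewrite author's own statement) =====
-- stated objective: simpler
-- what changed: B builds the grid position-first with a closed-form value per cell (pos, or pos^(pos>>1) for gray), removing A's mutation loop over hexagrams and the per-element linear .index scan of the gray-code list.
import Mathlib
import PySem

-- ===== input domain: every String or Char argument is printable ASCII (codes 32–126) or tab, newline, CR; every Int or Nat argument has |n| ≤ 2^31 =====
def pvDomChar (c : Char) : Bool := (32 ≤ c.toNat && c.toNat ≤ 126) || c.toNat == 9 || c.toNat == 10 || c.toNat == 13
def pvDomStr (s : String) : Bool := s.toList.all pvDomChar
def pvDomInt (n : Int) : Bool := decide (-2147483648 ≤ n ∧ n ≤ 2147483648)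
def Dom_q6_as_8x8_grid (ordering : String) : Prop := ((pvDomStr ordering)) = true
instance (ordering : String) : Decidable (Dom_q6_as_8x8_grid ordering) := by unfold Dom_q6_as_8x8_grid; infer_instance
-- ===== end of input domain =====

-- B builds the grid position-first with a closed-form value per cell; simpler than A's
-- mutation loop over hexagrams with an inverse .index lookup for the gray ordering.

-- ===== PORT A =====
-- helper: trigram_decomposition(h) = (h & 7, (h >> 3) & 7)
def pvTrigramDecomposition (h : Int) : Int × Int := (PySem.Int.band h 7, PySem.Int.band (h >>> 3) 7)

-- helper: the 'gray' branch of q6_to_grid_coords(h, 'gray').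
-- gray_order covers all of 0..63, so .index never raises; `getD 0` is unreachable.
def pvQ6ToGridCoordsGray (h : Int) : Int × Int :=
  let gray_order : List Int := (PySem.List.pyRange 0 64 1).map (fun i => PySem.Int.bxor i (i >>> 1))
  let pos : Int := (PySem.List.index? gray_order h).getD 0
  (PySem.Int.floordiv pos 8, PySem.Int.mod pos 8)

-- grid cells start as None and every cell is assigned exactly once in the loop,
-- so the final `getD 0` is unreachable; indices are in 0..7 so `.toNat` is exact.
def q6_as_8x8_grid (ordering : String) : List (List Int) :=
  let grid0 : List (List (Option Int)) := List.replicate 8 (List.replicate 8 none)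
  let grid := (PySem.List.pyRange 0 64 1).foldl (fun g h =>
    if ordering == "trigram" then
      let lu := pvTrigramDecomposition h
      g.set lu.2.toNat ((g.getD lu.2.toNat []).set lu.1.toNat (some h))
    else if ordering == "gray" then
      let rc := pvQ6ToGridCoordsGray h
      g.set rc.1.toNat ((g.getD rc.1.toNat []).set rc.2.toNat (some h))
    else
      g.set (PySem.Int.floordiv h 8).toNat ((g.getD (PySem.Int.floordiv h 8).toNat []).set (PySem.Int.mod h 8).toNat (some h))) grid0
  grid.map (fun row => row.map (fun o => o.getD 0))

-- ===== PORT B =====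
def q6_as_8x8_grid_alt (ordering : String) : List (List Int) :=
  if ordering == "gray" then
    (List.range 8).map (fun r => (List.range 8).map (fun c =>
      let p : Int := 8 * (r : Int) + (c : Int); PySem.Int.bxor p (p >>> 1)))
  else
    (List.range 8).map (fun r => (List.range 8).map (fun c => (8 * (r : Int) + (c : Int))))

-- ===== PRECONDITION & SPEC =====
def Spec_q6_as_8x8_grid (ordering : String) (out : List (List Int)) : Prop := out = q6_as_8x8_grid_alt ordering
instance (ordering : String) (out : List (List Int)) : Decidable (Spec_q6_as_8x8_grid ordering out) := by unfold Spec_q6_as_8x8_grid; infer_instance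

-- ===== CLAIM (what is proved, stated in full; the proofs are below) =====
def Claim_equal_q6_as_8x8_grid : Prop := ∀ (ordering : String), Dom_q6_as_8x8_grid ordering → Spec_q6_as_8x8_grid ordering (q6_as_8x8_grid ordering)

-- ===== LEMMAS AND PROOFS =====

-- ===== VERDICT (by name: the statement is the Claim_ definition above) =====
theorem q6_as_8x8_grid_spec : Claim_equal_q6_as_8x8_grid := by
  intro ordering _
  unfold Spec_q6_as_8x8_grid
  by_cases h1 : ordering = "trigram"
  · subst h1; decide
  · by_cases h2 : ordering = "gray"
    · subst h2; decide
    · have e1 : (ordering == "trigram") = false := by simp [h1]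
      have e2 : (ordering == "gray") = false := by simp [h2]
      simp only [q6_as_8x8_grid, q6_as_8x8_grid_alt, e1, e2, Bool.false_eq_true, if_false]
      decide
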